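-- pv_equiv track=rewrite | github.com/aa694849243/leetcode_cj | 第 98 场双周赛.py | handleQuery
-- ===== SOURCE A (Python) =====
-- from typing import List
--
-- class SegmentTree:
--     def __init__(self, arr):
--         self.tree = [0] * (4 * len(arr))
--         self.lazy = [0] * (4 * len(arr))
--         self.build(arr, 1, 0, len(arr) - 1)
--
--     def build(self, arr, idx, l, r):
--         if l == r:
--             self.tree[idx] = arr[l]
--             return
--         mid = (l + r) // 2
--         self.build(arr, idx * 2, l, mid)
--         self.build(arr, idx * 2 + 1, mid + 1, r)
--         self.tree[idx] = self.tree[idx * 2] + self.tree[idx * 2 + 1]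
--
--     def push(self, idx, l, r):
--         if self.lazy[idx] != 0:
--             self.tree[idx] = (r - l + 1) - self.tree[idx]
--             if l != r:
--                 self.lazy[idx * 2] ^= 1
--                 self.lazy[idx * 2 + 1] ^= 1
--             self.lazy[idx] = 0
--
--     def update(self, idx, l, r, ul, ur):
--         self.push(idx, l, r)
--         if l > ur or r < ul:
--             return
--         if ul <= l and r <= ur:
--             self.tree[idx] = (r - l + 1) - self.tree[idx]
--             if l != r:
--                 self.lazy[idx * 2] ^= 1
--                 self.lazy[idx * 2 + 1] ^= 1
--             return
--         mid = (l + r) // 2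
--         self.update(idx * 2, l, mid, ul, ur)
--         self.update(idx * 2 + 1, mid + 1, r, ul, ur)
--         self.tree[idx] = self.tree[idx * 2] + self.tree[idx * 2 + 1]
--
--     def query(self, idx, l, r, ql, qr):
--         self.push(idx, l, r)
--         if l > qr or r < ql:
--             return 0
--         if ql <= l and r <= qr:
--             return self.tree[idx]
--         mid = (l + r) // 2
--         return self.query(idx * 2, l, mid, ql, qr) + self.query(idx * 2 + 1, mid + 1, r, ql, qr)
--
-- def handleQuery(nums1: List[int], nums2: List[int], queries: List[List[int]]) -> List[int]:
--     res = []
--     tree = SegmentTree(nums1)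
--     total = sum(nums2)
--     for query in queries:
--         if query[0] == 1:
--             tree.update(1, 0, len(nums1) - 1, query[1], query[2])
--         elif query[0] == 2:
--             total += query[1] * tree.query(1, 0, len(nums1) - 1, 0, len(nums1) - 1)
--         else:
--             res.append(total)
--     return res
-- ===== SOURCE B (Python) =====
-- from typing import List
--
-- def handleQuery(nums1: List[int], nums2: List[int], queries: List[List[int]]) -> List[int]:
--     # Type-2 queries always read the full-range sum, so a flat array of current
--     # values plus a running sum replaces the lazy segment tree.
--     bits = list(nums1)
--     n = len(bits)
--     ones = sum(bits)
--     total = sum(nums2)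
--     res = []
--     for q in queries:
--         if q[0] == 1:
--             lo = max(q[1], 0)
--             hi = min(q[2], n - 1)
--             for i in range(lo, hi + 1):
--                 b = bits[i]
--                 bits[i] = 1 - b
--                 ones += 1 - 2 * b
--         elif q[0] == 2:
--             total += q[1] * ones
--         else:
--             res.append(total)
--     return res
-- ===== Notes on version B (the rewrite author's own statement) =====
-- stated objective: simpler
-- what changed: Replaced the lazy-propagation segment tree by a flat list of current values with a running total, exploiting that type-2 queries always read the full-range sum; range flips update the list and the running sum directly.
import Mathlib
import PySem

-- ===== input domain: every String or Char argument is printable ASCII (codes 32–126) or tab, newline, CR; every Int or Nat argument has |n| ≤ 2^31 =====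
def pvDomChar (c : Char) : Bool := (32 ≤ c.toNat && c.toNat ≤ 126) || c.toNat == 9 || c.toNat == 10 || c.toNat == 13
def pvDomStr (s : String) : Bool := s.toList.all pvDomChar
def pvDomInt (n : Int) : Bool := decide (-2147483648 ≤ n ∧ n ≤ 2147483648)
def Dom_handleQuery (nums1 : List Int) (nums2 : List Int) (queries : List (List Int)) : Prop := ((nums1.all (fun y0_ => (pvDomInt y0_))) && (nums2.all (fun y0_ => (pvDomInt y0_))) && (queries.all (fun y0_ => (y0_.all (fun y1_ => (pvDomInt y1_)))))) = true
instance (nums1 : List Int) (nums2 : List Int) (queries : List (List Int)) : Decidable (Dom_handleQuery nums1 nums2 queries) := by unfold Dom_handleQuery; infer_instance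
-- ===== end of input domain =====

-- B replaces A's lazy segment tree by a flat list of current values plus a running sum
-- (type-2 queries always read the full range); equivalence of RETURN values is proved on Pre_.

-- ===== PORT A =====
-- Python list indexing xs[i]: on every input admitted by Pre_ every index read below is in
-- range, so modelling it by `pyGetD _ _ 0` is exact there (out-of-range raises are excluded by Pre_).
def pget (xs : List Int) (i : Int) : Int := PySem.List.pyGetD xs i 0

-- A's tree/lazy lists (size 4n, always large enough for its recursion) modelled as total maps.
def fset (f : Int → Int) (i v : Int) : Int → Int := fun j => if j = i then v else f j

-- Python `a ^ 1` flips the last bit — exact for every int (also negatives).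
def pyxor1 (a : Int) : Int := if a % 2 = 0 then a + 1 else a - 1

-- `fuel` only guards the divergence A has on an empty array (excluded by Pre_);
-- with the fuel handleQuery passes, it never runs out on admitted inputs.
def buildA (fuel : Nat) (arr : List Int) (t : Int → Int) (idx l r : Int) : Int → Int :=
  match fuel with
  | 0 => t
  | fuel + 1 =>
    if l = r then fset t idx (pget arr l)
    else
      let mid := PySem.Int.floordiv (l + r) 2
      let t1 := buildA fuel arr t (idx * 2) l mid
      let t2 := buildA fuel arr t1 (idx * 2 + 1) (mid + 1) r
      fset t2 idx (t2 (idx * 2) + t2 (idx * 2 + 1))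

def pushA (t z : Int → Int) (idx l r : Int) : (Int → Int) × (Int → Int) :=
  if z idx ≠ 0 then
    let t1 := fset t idx ((r - l + 1) - t idx)
    let z1 := if l ≠ r then
        let za := fset z (idx * 2) (pyxor1 (z (idx * 2)))
        fset za (idx * 2 + 1) (pyxor1 (za (idx * 2 + 1)))
      else z
    (t1, fset z1 idx 0)
  else (t, z)

def updateA (fuel : Nat) (t z : Int → Int) (idx l r ul ur : Int) : (Int → Int) × (Int → Int) :=
  match fuel with
  | 0 => (t, z)
  | fuel + 1 =>
    let p := pushA t z idx l r
    if l > ur ∨ r < ul then p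
    else if ul ≤ l ∧ r ≤ ur then
      let t1 := fset p.1 idx ((r - l + 1) - p.1 idx)
      let z1 := if l ≠ r then
          let za := fset p.2 (idx * 2) (pyxor1 (p.2 (idx * 2)))
          fset za (idx * 2 + 1) (pyxor1 (za (idx * 2 + 1)))
        else p.2
      (t1, z1)
    else
      let mid := PySem.Int.floordiv (l + r) 2
      let p1 := updateA fuel p.1 p.2 (idx * 2) l mid ul ur
      let p2 := updateA fuel p1.1 p1.2 (idx * 2 + 1) (mid + 1) r ul ur
      (fset p2.1 idx (p2.1 (idx * 2) + p2.1 (idx * 2 + 1)), p2.2)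

def queryA (fuel : Nat) (t z : Int → Int) (idx l r ql qr : Int) : (Int → Int) × (Int → Int) × Int :=
  match fuel with
  | 0 => (t, z, 0)
  | fuel + 1 =>
    let p := pushA t z idx l r
    if l > qr ∨ r < ql then (p.1, p.2, 0)
    else if ql ≤ l ∧ r ≤ qr then (p.1, p.2, p.1 idx)
    else
      let mid := PySem.Int.floordiv (l + r) 2
      let q1 := queryA fuel p.1 p.2 (idx * 2) l mid ql qr
      let q2 := queryA fuel q1.1 q1.2.1 (idx * 2 + 1) (mid + 1) r ql qr
      (q2.1, q2.2.1, q1.2.2 + q2.2.2)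

-- the body of A's `for query in queries` loop
def stepA (n : Int) (fuel : Nat) (st : (Int → Int) × (Int → Int) × Int × List Int)
    (q : List Int) : (Int → Int) × (Int → Int) × Int × List Int :=
  if pget q 0 = 1 then
    let p := updateA fuel st.1 st.2.1 1 0 (n - 1) (pget q 1) (pget q 2)
    (p.1, p.2, st.2.2.1, st.2.2.2)
  else if pget q 0 = 2 then
    let p := queryA fuel st.1 st.2.1 1 0 (n - 1) 0 (n - 1)
    (p.1, p.2.1, st.2.2.1 + pget q 1 * p.2.2, st.2.2.2)
  else (st.1, st.2.1, st.2.2.1, st.2.2.2 ++ [st.2.2.1])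

def handleQuery (nums1 : List Int) (nums2 : List Int) (queries : List (List Int)) : List Int :=
  let n : Int := nums1.length
  let fuel : Nat := nums1.length
  let t0 := buildA fuel nums1 (fun _ => 0) 1 0 (n - 1)
  (queries.foldl (stepA n fuel) (t0, fun _ => 0, nums2.sum, [])).2.2.2

-- ===== PORT B =====
-- B keeps the current values as a flat list `bits` plus the running sum `ones`.
-- bits[i] is read/written only at 0 ≤ i < bits.length (loop bounds are clamped),
-- where pget/List.set are exact.
def flipGoB (idxs : List Int) (bits : List Int) (ones : Int) : List Int × Int :=
  match idxs with
  | [] => (bits, ones)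
  | i :: rest =>
    let b := pget bits i
    flipGoB rest (bits.set i.toNat (1 - b)) (ones + 1 - 2 * b)

-- the body of B's `for q in queries` loop
def stepB (n : Int) (st : List Int × Int × Int × List Int) (q : List Int) :
    List Int × Int × Int × List Int :=
  if pget q 0 = 1 then
    let lo := max (pget q 1) 0
    let hi := min (pget q 2) (n - 1)
    let p := flipGoB (PySem.List.pyRange lo (hi + 1) 1) st.1 st.2.1
    (p.1, p.2, st.2.2.1, st.2.2.2)
  else if pget q 0 = 2 then (st.1, st.2.1, st.2.2.1 + pget q 1 * st.2.1, st.2.2.2)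
  else (st.1, st.2.1, st.2.2.1, st.2.2.2 ++ [st.2.2.1])

def handleQuery_alt (nums1 : List Int) (nums2 : List Int) (queries : List (List Int)) : List Int :=
  let n : Int := nums1.length
  (queries.foldl (stepB n) (nums1, nums1.sum, nums2.sum, [])).2.2.2

-- ===== PRECONDITION & SPEC =====
-- Pre_ excludes exactly the inputs where the Python A raises: empty nums1 (RecursionError in
-- the tree build) and malformed queries (IndexError: empty query, or too short for its kind).
def Pre_handleQuery (nums1 : List Int) (nums2 : List Int) (queries : List (List Int)) : Prop :=
  nums1 ≠ [] ∧ ∀ q ∈ queries, q ≠ [] ∧ (q.head? = some 1 → 3 ≤ q.length) ∧ (q.head? = some 2 → 2 ≤ q.length)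
instance (nums1 : List Int) (nums2 : List Int) (queries : List (List Int)) : Decidable (Pre_handleQuery nums1 nums2 queries) := by unfold Pre_handleQuery; infer_instance

def pvWitness_handleQuery : List Int × List Int × List (List Int) :=
  ([1, 0, 1], [5], [[2, 1], [3], [1, 0, 1], [2, 2], [3]])

def Spec_handleQuery (nums1 : List Int) (nums2 : List Int) (queries : List (List Int)) (out : List Int) : Prop := out = handleQuery_alt nums1 nums2 queries
instance (nums1 : List Int) (nums2 : List Int) (queries : List (List Int)) (out : List Int) : Decidable (Spec_handleQuery nums1 nums2 queries out) := by unfold Spec_handleQuery; infer_instance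

-- ===== CLAIM (what is proved, stated in full; the proofs are below) =====
def Claim_equal_handleQuery : Prop := ∀ (nums1 : List Int) (nums2 : List Int) (queries : List (List Int)), Dom_handleQuery nums1 nums2 queries → Pre_handleQuery nums1 nums2 queries → Spec_handleQuery nums1 nums2 queries (handleQuery nums1 nums2 queries)

-- ===== LEMMAS AND PROOFS =====

theorem pv_mid_bounds {l r : Int} (h : l < r) :
    l ≤ PySem.Int.floordiv (l + r) 2 ∧ PySem.Int.floordiv (l + r) 2 < r := by
  rw [PySem.Int.floordiv_eq_ediv_of_pos (by norm_num)]
  omega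

def flipL (p : Int) (xs : List Int) : List Int := if p = 0 then xs else xs.map (fun x => 1 - x)

theorem pvFlipFlip (xs : List Int) : (xs.map (fun x => 1 - x)).map (fun x => 1 - x) = xs := by
  rw [List.map_map]
  have : ((fun x : Int => 1 - x) ∘ fun x : Int => 1 - x) = id := by funext x; simp
  rw [this, List.map_id]

theorem sum_map_flip (xs : List Int) : (xs.map (fun x => 1 - x)).sum = xs.length - xs.sum := by
  induction xs with
  | nil => simp
  | cons a xs ih => simp [ih]; push_cast; ring

def den (t z : Int → Int) (idx l r : Int) : List Int :=
  if h : r ≤ l then flipL (z idx) [t idx]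
  else
    flipL (z idx) (den t z (idx * 2) l (PySem.Int.floordiv (l + r) 2) ++
      den t z (idx * 2 + 1) (PySem.Int.floordiv (l + r) 2 + 1) r)
termination_by (r - l).toNat
decreasing_by
  · have := pv_mid_bounds (show l < r by omega); omega
  · have := pv_mid_bounds (show l < r by omega); omega

def SegInv (t z : Int → Int) (idx l r : Int) : Prop :=
  if h : r ≤ l then True
  else
    t idx = (den t z (idx * 2) l (PySem.Int.floordiv (l + r) 2)).sum +
        (den t z (idx * 2 + 1) (PySem.Int.floordiv (l + r) 2 + 1) r).sum ∧
      SegInv t z (idx * 2) l (PySem.Int.floordiv (l + r) 2) ∧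
      SegInv t z (idx * 2 + 1) (PySem.Int.floordiv (l + r) 2 + 1) r
termination_by (r - l).toNat
decreasing_by
  · have := pv_mid_bounds (show l < r by omega); omega
  · have := pv_mid_bounds (show l < r by omega); omega

theorem flipL_length (p : Int) (xs : List Int) : (flipL p xs).length = xs.length := by
  unfold flipL; split <;> simp

theorem den_len (t z : Int → Int) (idx l r : Int) : (den t z idx l r).length = (r - l).toNat + 1 := by
  fun_induction den with
  | case1 idx l r h => simp [flipL_length]; omega
  | case2 idx l r h ih1 ih2 =>
    rw [flipL_length]
    have := pv_mid_bounds (show l < r by omega)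
    rw [List.length_append, ih1, ih2]
    omega

def pref (i j : Int) : Prop := ∃ k : Nat, i * 2 ^ k ≤ j ∧ j < (i + 1) * 2 ^ k

theorem pref_self (i : Int) : pref i i := ⟨0, by simp⟩

theorem pref_child0 {i j : Int} (h : pref (i * 2) j) : pref i j := by
  obtain ⟨k, h1, h2⟩ := h
  have hp : (0:Int) < 2 ^ k := by positivity
  have e1 : i * 2 ^ (k + 1) = i * 2 * 2 ^ k := by ring
  have e2 : (i + 1) * 2 ^ (k + 1) = (i * 2 + 2) * 2 ^ k := by ring
  exact ⟨k + 1, by linarith, by nlinarith⟩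

theorem pref_child1 {i j : Int} (h : pref (i * 2 + 1) j) : pref i j := by
  obtain ⟨k, h1, h2⟩ := h
  have hp : (0:Int) < 2 ^ k := by positivity
  have e1 : i * 2 ^ (k + 1) = i * 2 * 2 ^ k := by ring
  have e2 : (i + 1) * 2 ^ (k + 1) = (i * 2 + 1 + 1) * 2 ^ k := by ring
  exact ⟨k + 1, by nlinarith, by linarith⟩

theorem pref_disj {i j : Int} (hi : 1 ≤ i) (h0 : pref (i * 2) j) (h1 : pref (i * 2 + 1) j) : False := by
  obtain ⟨a, ha1, ha2⟩ := h0
  obtain ⟨b, hb1, hb2⟩ := h1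
  have hpa : (0:Int) < 2 ^ a := by positivity
  have hpb : (0:Int) < 2 ^ b := by positivity
  rcases le_or_gt a b with hab | hab
  · have hle : (2:Int) ^ a ≤ 2 ^ b := pow_le_pow_right₀ (by norm_num) hab
    nlinarith
  · have hle : (2:Int) ^ b ≤ 2 ^ (a - 1) := pow_le_pow_right₀ (by norm_num) (by omega)
    have h2a : (2:Int) ^ a = 2 ^ (a - 1) * 2 := by rw [← pow_succ]; congr 1; omega
    have hpa1 : (0:Int) < 2 ^ (a - 1) := by positivity
    nlinarith

theorem pref_c0_not_self {i : Int} (hi : 1 ≤ i) : ¬ pref (i * 2) i := by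
  rintro ⟨k, h1, h2⟩
  have hp : (1:Int) ≤ 2 ^ k := one_le_pow₀ (by norm_num)
  nlinarith

theorem pref_c1_not_self {i : Int} (hi : 1 ≤ i) : ¬ pref (i * 2 + 1) i := by
  rintro ⟨k, h1, h2⟩
  have hp : (1:Int) ≤ 2 ^ k := one_le_pow₀ (by norm_num)
  nlinarith

theorem pref_of_c0 (i : Int) : pref i (i * 2) := pref_child0 (pref_self _)

theorem pref_of_c1 (i : Int) : pref i (i * 2 + 1) := pref_child1 (pref_self _)

theorem den_leaf (t z : Int → Int) (idx l r : Int) (h : r ≤ l) :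
    den t z idx l r = flipL (z idx) [t idx] := by
  rw [den.eq_def, dif_pos h]

theorem den_node (t z : Int → Int) (idx l r : Int) (h : ¬ r ≤ l) :
    den t z idx l r = flipL (z idx) (den t z (idx * 2) l (PySem.Int.floordiv (l + r) 2) ++
      den t z (idx * 2 + 1) (PySem.Int.floordiv (l + r) 2 + 1) r) := by
  rw [den.eq_def, dif_neg h]

theorem SegInv_leaf (t z : Int → Int) (idx l r : Int) (h : r ≤ l) : SegInv t z idx l r := by
  rw [SegInv.eq_def, dif_pos h]; trivial

theorem SegInv_node (t z : Int → Int) (idx l r : Int) (h : ¬ r ≤ l) :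
    SegInv t z idx l r ↔
      (t idx = (den t z (idx * 2) l (PySem.Int.floordiv (l + r) 2)).sum +
          (den t z (idx * 2 + 1) (PySem.Int.floordiv (l + r) 2 + 1) r).sum ∧
        SegInv t z (idx * 2) l (PySem.Int.floordiv (l + r) 2) ∧
        SegInv t z (idx * 2 + 1) (PySem.Int.floordiv (l + r) 2 + 1) r) := by
  rw [SegInv.eq_def, dif_neg h]

def LZ01 (z : Int → Int) : Prop := ∀ j, z j = 0 ∨ z j = 1

theorem den_congr (t1 z1 t2 z2 : Int → Int) : ∀ (m : Nat) (idx l r : Int), (r - l).toNat = m →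
    (∀ j, pref idx j → t1 j = t2 j ∧ z1 j = z2 j) → den t1 z1 idx l r = den t2 z2 idx l r := by
  intro m
  induction m using Nat.strong_induction_on with
  | _ m ih =>
    intro idx l r hm hag
    by_cases h : r ≤ l
    · rw [den_leaf _ _ _ _ _ h, den_leaf _ _ _ _ _ h,
        (hag idx (pref_self idx)).1, (hag idx (pref_self idx)).2]
    · have hb := pv_mid_bounds (show l < r by omega)
      rw [den_node _ _ _ _ _ h, den_node _ _ _ _ _ h, (hag idx (pref_self idx)).2,
        ih (PySem.Int.floordiv (l + r) 2 - l).toNat (by omega) (idx * 2) l _ rfl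
          (fun j hj => hag j (pref_child0 hj)),
        ih (r - (PySem.Int.floordiv (l + r) 2 + 1)).toNat (by omega) (idx * 2 + 1) _ r rfl
          (fun j hj => hag j (pref_child1 hj))]

theorem SegInv_congr (t1 z1 t2 z2 : Int → Int) : ∀ (m : Nat) (idx l r : Int), (r - l).toNat = m →
    1 ≤ idx → (∀ j, pref idx j → t1 j = t2 j) → (∀ j, pref idx j → j ≠ idx → z1 j = z2 j) →
    (SegInv t1 z1 idx l r ↔ SegInv t2 z2 idx l r) := by
  intro m
  induction m using Nat.strong_induction_on with
  | _ m ih =>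
    intro idx l r hm hi hagt hagz
    by_cases h : r ≤ l
    · simp [SegInv_leaf _ _ _ _ _ h]
    · have hb := pv_mid_bounds (show l < r by omega)
      have hzL : ∀ j, pref (idx * 2) j → t1 j = t2 j ∧ z1 j = z2 j := by
        intro j hj
        refine ⟨hagt j (pref_child0 hj), hagz j (pref_child0 hj) ?_⟩
        rintro rfl; exact pref_c0_not_self hi hj
      have hzR : ∀ j, pref (idx * 2 + 1) j → t1 j = t2 j ∧ z1 j = z2 j := by
        intro j hj
        refine ⟨hagt j (pref_child1 hj), hagz j (pref_child1 hj) ?_⟩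
        rintro rfl; exact pref_c1_not_self hi hj
      rw [SegInv_node _ _ _ _ _ h, SegInv_node _ _ _ _ _ h]
      rw [hagt idx (pref_self idx),
        den_congr t1 z1 t2 z2 _ (idx * 2) l _ rfl hzL,
        den_congr t1 z1 t2 z2 _ (idx * 2 + 1) _ r rfl hzR,
        ih (PySem.Int.floordiv (l + r) 2 - l).toNat (by omega) (idx * 2) l _ rfl (by omega)
          (fun j hj => (hzL j hj).1) (fun j hj _ => (hzL j hj).2),
        ih (r - (PySem.Int.floordiv (l + r) 2 + 1)).toNat (by omega) (idx * 2 + 1) _ r rfl (by omega)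
          (fun j hj => (hzR j hj).1) (fun j hj _ => (hzR j hj).2)]

theorem flipL_toggle (p : Int) (hp : p = 0 ∨ p = 1) (xs : List Int) :
    flipL (pyxor1 p) xs = (flipL p xs).map (fun x => 1 - x) := by
  rcases hp with rfl | rfl
  · simp [pyxor1, flipL]
  · simp [pyxor1, flipL, pvFlipFlip]

theorem den_toggle (t z : Int → Int) (idx l r : Int) (h1 : 1 ≤ idx) (hz : z idx = 0 ∨ z idx = 1) :
    den t (fset z idx (pyxor1 (z idx))) idx l r = (den t z idx l r).map (fun x => 1 - x) := by
  have hroot : fset z idx (pyxor1 (z idx)) idx = pyxor1 (z idx) := by simp [fset]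
  by_cases h : r ≤ l
  · rw [den_leaf _ _ _ _ _ h, den_leaf _ _ _ _ _ h, hroot, flipL_toggle _ hz]
  · have hb := pv_mid_bounds (show l < r by omega)
    rw [den_node _ _ _ _ _ h, den_node _ _ _ _ _ h, hroot]
    rw [den_congr _ _ t z _ (idx * 2) l _ rfl (by
      intro j hj
      refine ⟨rfl, ?_⟩
      have : j ≠ idx := by rintro rfl; exact pref_c0_not_self h1 hj
      simp [fset, this])]
    rw [den_congr _ _ t z _ (idx * 2 + 1) _ r rfl (by
      intro j hj
      refine ⟨rfl, ?_⟩
      have : j ≠ idx := by rintro rfl; exact pref_c1_not_self h1 hj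
      simp [fset, this])]
    rw [flipL_toggle _ hz]

theorem fset_self (f : Int → Int) (i v : Int) : fset f i v i = v := by simp [fset]

theorem fset_other (f : Int → Int) (i v j : Int) (h : j ≠ i) : fset f i v j = f j := by
  simp [fset, h]

theorem pyxor1_mem {a : Int} (h : a = 0 ∨ a = 1) : pyxor1 a = 0 ∨ pyxor1 a = 1 := by
  rcases h with rfl | rfl <;> simp [pyxor1]

theorem flipL_sum (p : Int) (xs : List Int) :
    (flipL p xs).sum = if p = 0 then xs.sum else (xs.length : Int) - xs.sum := by
  unfold flipL; split <;> simp [sum_map_flip]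

theorem push_spec (t z : Int → Int) (idx l r : Int) (h1 : 1 ≤ idx) (hlr : l ≤ r) (hz : LZ01 z) :
    (∀ j, ¬ pref idx j → (pushA t z idx l r).1 j = t j ∧ (pushA t z idx l r).2 j = z j) ∧
    LZ01 (pushA t z idx l r).2 ∧
    (pushA t z idx l r).2 idx = 0 ∧
    den (pushA t z idx l r).1 (pushA t z idx l r).2 idx l r = den t z idx l r ∧
    (SegInv t z idx l r → SegInv (pushA t z idx l r).1 (pushA t z idx l r).2 idx l r) ∧
    (SegInv t z idx l r → (pushA t z idx l r).1 idx = (den t z idx l r).sum) := by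
  by_cases hzi : z idx = 0
  · have hP : pushA t z idx l r = (t, z) := by simp [pushA, hzi]
    rw [hP]
    refine ⟨fun j _ => ⟨rfl, rfl⟩, hz, hzi, rfl, fun h => h, fun hInv => ?_⟩
    by_cases h : r ≤ l
    · rw [den_leaf _ _ _ _ _ h]; simp [flipL, hzi]
    · rw [den_node _ _ _ _ _ h, flipL_sum, if_pos hzi, List.sum_append]
      exact ((SegInv_node _ _ _ _ _ h).1 hInv).1
  · have hz1 : z idx = 1 := by rcases hz idx with h | h <;> omega
    by_cases hleaf : l = r
    · subst hleaf
      have hP : pushA t z idx l l = (fset t idx ((l - l + 1) - t idx), fset z idx 0) := by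
        simp [pushA, hzi]
      rw [hP]; dsimp only
      refine ⟨fun j hj => ?_, fun j => ?_, fset_self _ _ _, ?_, fun _ => SegInv_leaf _ _ _ _ _ le_rfl,
        fun _ => ?_⟩
      · have hji : j ≠ idx := by rintro rfl; exact hj (pref_self _)
        exact ⟨fset_other _ _ _ _ hji, fset_other _ _ _ _ hji⟩
      · by_cases hji : j = idx
        · subst hji; rw [fset_self]; left; rfl
        · rw [fset_other _ _ _ _ hji]; exact hz j
      · rw [den_leaf _ _ _ _ _ le_rfl, den_leaf _ _ _ _ _ le_rfl, fset_self, fset_self, hz1]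
        simp [flipL]
      · rw [den_leaf _ _ _ _ _ le_rfl, fset_self, hz1]
        simp [flipL]
    · -- internal node with pending lazy
      have hlr' : l < r := lt_of_le_of_ne hlr hleaf
      have hnotle : ¬ r ≤ l := by omega
      have hmid := pv_mid_bounds hlr'
      have hc0 : (1:Int) ≤ idx * 2 := by omega
      have hc1 : (1:Int) ≤ idx * 2 + 1 := by omega
      have hne01 : idx * 2 + 1 ≠ idx * 2 := by omega
      have hne10 : idx * 2 ≠ idx * 2 + 1 := by omega
      have hneI0 : idx * 2 ≠ idx := by omega
      have hneI1 : idx * 2 + 1 ≠ idx := by omega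
      have hP : pushA t z idx l r =
          (fset t idx ((r - l + 1) - t idx),
           fset (fset (fset z (idx * 2) (pyxor1 (z (idx * 2)))) (idx * 2 + 1)
             (pyxor1 ((fset z (idx * 2) (pyxor1 (z (idx * 2)))) (idx * 2 + 1)))) idx 0) := by
        simp [pushA, hzi, hleaf]
      rw [hP]; dsimp only
      set t1 := fset t idx ((r - l + 1) - t idx) with ht1
      set za := fset z (idx * 2) (pyxor1 (z (idx * 2))) with hza
      set zb := fset za (idx * 2 + 1) (pyxor1 (za (idx * 2 + 1))) with hzb
      set zf := fset zb idx 0 with hzf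
      have hza1 : za (idx * 2 + 1) = z (idx * 2 + 1) := fset_other _ _ _ _ hne01
      have hzfidx : zf idx = 0 := fset_self _ _ _
      have ht1idx : t1 idx = (r - l + 1) - t idx := fset_self _ _ _
      have hzfout : ∀ j, j ≠ idx → j ≠ idx * 2 → j ≠ idx * 2 + 1 → zf j = z j := by
        intro j hj0 hj1 hj2
        rw [hzf, fset_other _ _ _ _ hj0, hzb, fset_other _ _ _ _ hj2, hza, fset_other _ _ _ _ hj1]
      have cL : ∀ j, pref (idx * 2) j → t1 j = t j ∧ zf j = za j := by
        intro j hj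
        have hj0 : j ≠ idx := by rintro rfl; exact pref_c0_not_self h1 hj
        have hj2 : j ≠ idx * 2 + 1 := by rintro rfl; exact pref_disj h1 hj (pref_self _)
        exact ⟨fset_other _ _ _ _ hj0, by rw [hzf, fset_other _ _ _ _ hj0, hzb, fset_other _ _ _ _ hj2]⟩
      have cR : ∀ j, pref (idx * 2 + 1) j →
          t1 j = t j ∧ zf j = fset z (idx * 2 + 1) (pyxor1 (z (idx * 2 + 1))) j := by
        intro j hj
        have hj0 : j ≠ idx := by rintro rfl; exact pref_c1_not_self h1 hj
        have hj1 : j ≠ idx * 2 := by rintro rfl; exact pref_disj h1 (pref_self _) hj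
        refine ⟨fset_other _ _ _ _ hj0, ?_⟩
        rw [hzf, fset_other _ _ _ _ hj0]
        by_cases hj2 : j = idx * 2 + 1
        · subst hj2; rw [hzb, fset_self, fset_self, hza1]
        · rw [hzb, fset_other _ _ _ _ hj2, hza, fset_other _ _ _ _ hj1,
            fset_other _ _ _ _ hj2]
      have denL : den t1 zf (idx * 2) l (PySem.Int.floordiv (l + r) 2) =
          (den t z (idx * 2) l (PySem.Int.floordiv (l + r) 2)).map (fun x => 1 - x) := by
        rw [den_congr t1 zf t za _ (idx * 2) l _ rfl cL, hza]
        exact den_toggle t z (idx * 2) l _ hc0 (hz _)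
      have denR : den t1 zf (idx * 2 + 1) (PySem.Int.floordiv (l + r) 2 + 1) r =
          (den t z (idx * 2 + 1) (PySem.Int.floordiv (l + r) 2 + 1) r).map (fun x => 1 - x) := by
        rw [den_congr t1 zf t (fset z (idx * 2 + 1) (pyxor1 (z (idx * 2 + 1)))) _ (idx * 2 + 1) _ r rfl cR]
        exact den_toggle t z (idx * 2 + 1) _ r hc1 (hz _)
      have hdeneq : den t1 zf idx l r = den t z idx l r := by
        rw [den_node _ _ _ _ _ hnotle, den_node t z _ _ _ hnotle, hzfidx, hz1, denL, denR]
        simp [flipL, List.map_append]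
      refine ⟨fun j hj => ?_, fun j => ?_, hzfidx, hdeneq, fun hInv => ?_, fun hInv => ?_⟩
      · have hj0 : j ≠ idx := by rintro rfl; exact hj (pref_self _)
        have hj1 : j ≠ idx * 2 := by rintro rfl; exact hj (pref_of_c0 _)
        have hj2 : j ≠ idx * 2 + 1 := by rintro rfl; exact hj (pref_of_c1 _)
        exact ⟨fset_other _ _ _ _ hj0, hzfout j hj0 hj1 hj2⟩
      · by_cases hj0 : j = idx
        · subst hj0; rw [hzfidx]; left; rfl
        · by_cases hj1 : j = idx * 2
          · subst hj1
            rw [hzf, fset_other _ _ _ _ hneI0, hzb, fset_other _ _ _ _ hne10, hza, fset_self]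
            exact pyxor1_mem (hz _)
          · by_cases hj2 : j = idx * 2 + 1
            · subst hj2
              rw [hzf, fset_other _ _ _ _ hneI1, hzb, fset_self, hza1]
              exact pyxor1_mem (hz _)
            · rw [hzfout j hj0 hj1 hj2]; exact hz j
      · obtain ⟨hsum, hIL, hIR⟩ := (SegInv_node t z idx l r hnotle).1 hInv
        refine (SegInv_node t1 zf idx l r hnotle).2 ⟨?_, ?_, ?_⟩
        · rw [denL, denR, sum_map_flip, sum_map_flip, den_len, den_len, ht1idx]
          have hlen : (((PySem.Int.floordiv (l + r) 2 - l).toNat : Int) + 1) +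
              (((r - (PySem.Int.floordiv (l + r) 2 + 1)).toNat : Int) + 1) = r - l + 1 := by omega
          push_cast at hlen ⊢
          linarith [hsum, hlen]
        · refine (SegInv_congr t1 zf t z _ (idx * 2) l _ rfl hc0
            (fun j hj => (cL j hj).1) (fun j hj hjr => ?_)).2 hIL
          rw [(cL j hj).2, hza, fset_other _ _ _ _ hjr]
        · refine (SegInv_congr t1 zf t z _ (idx * 2 + 1) _ r rfl hc1
            (fun j hj => (cR j hj).1) (fun j hj hjr => ?_)).2 hIR
          rw [(cR j hj).2, fset_other _ _ _ _ hjr]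
      · obtain ⟨hsum, hIL, hIR⟩ := (SegInv_node t z idx l r hnotle).1 hInv
        rw [den_node t z idx l r hnotle, ht1idx, flipL_sum, if_neg (by rw [hz1]; norm_num),
          List.sum_append, List.length_append, den_len, den_len, hsum]
        have hlen : (((PySem.Int.floordiv (l + r) 2 - l).toNat : Int) + 1) +
            (((r - (PySem.Int.floordiv (l + r) 2 + 1)).toNat : Int) + 1) = r - l + 1 := by omega
        push_cast at hlen ⊢
        linarith [hlen]

def seg (arr : List Int) (l r : Int) : List Int :=
  (List.range ((r - l).toNat + 1)).map (fun i : Nat => pget arr (l + (i : Int)))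

def z0 : Int → Int := fun _ => 0

theorem seg_leaf (arr : List Int) (l r : Int) (h : r ≤ l) : seg arr l r = [pget arr l] := by
  unfold seg
  have : (r - l).toNat = 0 := by omega
  simp [this]

theorem seg_split (arr : List Int) (l mid r : Int) (h1 : l ≤ mid) (h2 : mid < r) :
    seg arr l r = seg arr l mid ++ seg arr (mid + 1) r := by
  unfold seg
  have hn : (r - l).toNat + 1 = ((mid - l).toNat + 1) + ((r - (mid + 1)).toNat + 1) := by omega
  rw [hn, List.range_add, List.map_append, List.map_map]
  congr 1
  apply List.map_congr_left
  intro x _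
  simp only [Function.comp_apply]
  congr 1
  push_cast
  omega

theorem build_spec : ∀ (fuel : Nat) (arr : List Int) (t : Int → Int) (idx l r : Int),
    1 ≤ idx → l ≤ r → (r - l).toNat < fuel →
    (∀ j, ¬ pref idx j → buildA fuel arr t idx l r j = t j) ∧
    den (buildA fuel arr t idx l r) z0 idx l r = seg arr l r ∧
    SegInv (buildA fuel arr t idx l r) z0 idx l r ∧
    buildA fuel arr t idx l r idx = (seg arr l r).sum := by
  intro fuel
  induction fuel with
  | zero => intro arr t idx l r _ _ hf; omega
  | succ fuel ih =>
    intro arr t idx l r h1 hlr hf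
    by_cases hlf : l = r
    · subst hlf
      have hB : buildA (fuel + 1) arr t idx l l = fset t idx (pget arr l) := by
        simp [buildA]
      rw [hB]
      refine ⟨fun j hj => fset_other _ _ _ _ (by rintro rfl; exact hj (pref_self _)), ?_,
        SegInv_leaf _ _ _ _ _ le_rfl, ?_⟩
      · rw [den_leaf _ _ _ _ _ le_rfl, seg_leaf _ _ _ le_rfl, fset_self]
        simp [flipL, z0]
      · rw [seg_leaf _ _ _ le_rfl, fset_self]; simp
    · have hlr' : l < r := lt_of_le_of_ne hlr hlf
      have hnotle : ¬ r ≤ l := by omega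
      have hmid := pv_mid_bounds hlr'
      have hc0 : (1:Int) ≤ idx * 2 := by omega
      have hc1 : (1:Int) ≤ idx * 2 + 1 := by omega
      have hB : buildA (fuel + 1) arr t idx l r =
          fset (buildA fuel arr (buildA fuel arr t (idx * 2) l (PySem.Int.floordiv (l + r) 2))
              (idx * 2 + 1) (PySem.Int.floordiv (l + r) 2 + 1) r) idx
            ((buildA fuel arr (buildA fuel arr t (idx * 2) l (PySem.Int.floordiv (l + r) 2))
              (idx * 2 + 1) (PySem.Int.floordiv (l + r) 2 + 1) r) (idx * 2) +
             (buildA fuel arr (buildA fuel arr t (idx * 2) l (PySem.Int.floordiv (l + r) 2))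
              (idx * 2 + 1) (PySem.Int.floordiv (l + r) 2 + 1) r) (idx * 2 + 1)) := by
        simp [buildA, hlf]
      rw [hB]
      set t1 := buildA fuel arr t (idx * 2) l (PySem.Int.floordiv (l + r) 2) with ht1
      set t2 := buildA fuel arr t1 (idx * 2 + 1) (PySem.Int.floordiv (l + r) 2 + 1) r with ht2
      obtain ⟨fL, dL, iL, sL⟩ := ih arr t (idx * 2) l (PySem.Int.floordiv (l + r) 2) hc0
        (by omega) (by omega)
      obtain ⟨fR, dR, iR, sR⟩ := ih arr t1 (idx * 2 + 1) (PySem.Int.floordiv (l + r) 2 + 1) r hc1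
        (by omega) (by omega)
      set tf := fset t2 idx (t2 (idx * 2) + t2 (idx * 2 + 1)) with htf
      have hfL : ∀ j, pref (idx * 2) j → tf j = t1 j := by
        intro j hj
        have hj0 : j ≠ idx := by rintro rfl; exact pref_c0_not_self h1 hj
        rw [htf, fset_other _ _ _ _ hj0, ht2, fR j (fun hc => pref_disj h1 hj hc)]
      have hfR : ∀ j, pref (idx * 2 + 1) j → tf j = t2 j := by
        intro j hj
        have hj0 : j ≠ idx := by rintro rfl; exact pref_c1_not_self h1 hj
        rw [htf, fset_other _ _ _ _ hj0]
      have denL : den tf z0 (idx * 2) l (PySem.Int.floordiv (l + r) 2) = seg arr l (PySem.Int.floordiv (l + r) 2) := by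
        rw [den_congr tf z0 t1 z0 _ (idx * 2) l _ rfl (fun j hj => ⟨hfL j hj, rfl⟩)]
        exact dL
      have denR : den tf z0 (idx * 2 + 1) (PySem.Int.floordiv (l + r) 2 + 1) r = seg arr (PySem.Int.floordiv (l + r) 2 + 1) r := by
        rw [den_congr tf z0 t2 z0 _ (idx * 2 + 1) _ r rfl (fun j hj => ⟨hfR j hj, rfl⟩)]
        exact dR
      have ht2L : t2 (idx * 2) = (seg arr l (PySem.Int.floordiv (l + r) 2)).sum := by
        rw [ht2, fR (idx * 2) (fun hc => pref_disj h1 (pref_self _) hc)]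
        exact sL
      have hden : den tf z0 idx l r = seg arr l r := by
        rw [den_node _ _ _ _ _ hnotle, denL, denR,
          seg_split arr l (PySem.Int.floordiv (l + r) 2) r (by omega) (by omega)]
        simp [flipL, z0]
      refine ⟨fun j hj => ?_, hden, ?_, ?_⟩
      · have hj0 : j ≠ idx := by rintro rfl; exact hj (pref_self _)
        rw [htf, fset_other _ _ _ _ hj0, ht2,
          fR j (fun hc => hj (pref_child1 hc)), ht1, fL j (fun hc => hj (pref_child0 hc))]
      · refine (SegInv_node tf z0 idx l r hnotle).2 ⟨?_, ?_, ?_⟩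
        · rw [denL, denR, htf, fset_self, ht2L, ht2, sR]
        · exact (SegInv_congr tf z0 t1 z0 _ (idx * 2) l _ rfl hc0
            (fun j hj => hfL j hj) (fun _ _ _ => rfl)).2 iL
        · exact (SegInv_congr tf z0 t2 z0 _ (idx * 2 + 1) _ r rfl hc1
            (fun j hj => hfR j hj) (fun _ _ _ => rfl)).2 iR
      · rw [htf, fset_self, ht2L, ht2, sR,
          seg_split arr l (PySem.Int.floordiv (l + r) 2) r (by omega) (by omega), List.sum_append]

def flipSeg (ul ur pos : Int) : List Int → List Int
  | [] => []
  | x :: xs => (if ul ≤ pos ∧ pos ≤ ur then 1 - x else x) :: flipSeg ul ur (pos + 1) xs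

theorem flipSeg_length (ul ur : Int) : ∀ (xs : List Int) (pos : Int),
    (flipSeg ul ur pos xs).length = xs.length := by
  intro xs
  induction xs with
  | nil => intro pos; rfl
  | cons x xs ih => intro pos; simp [flipSeg, ih]

theorem flipSeg_append (ul ur : Int) : ∀ (xs ys : List Int) (pos : Int),
    flipSeg ul ur pos (xs ++ ys) = flipSeg ul ur pos xs ++ flipSeg ul ur (pos + xs.length) ys := by
  intro xs
  induction xs with
  | nil => intro ys pos; simp [flipSeg]
  | cons x xs ih =>
    intro ys pos
    simp only [List.cons_append, flipSeg, ih, List.length_cons]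
    have e : pos + 1 + (xs.length : Int) = pos + ((xs.length + 1 : Nat) : Int) := by push_cast; ring
    rw [e]

theorem flipSeg_out (ul ur : Int) : ∀ (xs : List Int) (pos : Int),
    (ur < pos ∨ pos + (xs.length : Int) - 1 < ul) → flipSeg ul ur pos xs = xs := by
  intro xs
  induction xs with
  | nil => intro pos _; rfl
  | cons x xs ih =>
    intro pos h
    simp only [List.length_cons] at h
    have hcond : ¬ (ul ≤ pos ∧ pos ≤ ur) := by
      push_cast at h; omega
    simp only [flipSeg, if_neg hcond]
    rw [ih (pos + 1) (by push_cast at h ⊢; omega)]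

theorem flipSeg_in (ul ur : Int) : ∀ (xs : List Int) (pos : Int),
    ul ≤ pos → pos + (xs.length : Int) - 1 ≤ ur →
    flipSeg ul ur pos xs = xs.map (fun x => 1 - x) := by
  intro xs
  induction xs with
  | nil => intro pos _ _; rfl
  | cons x xs ih =>
    intro pos h1 h2
    simp only [List.length_cons] at h2
    have hcond : ul ≤ pos ∧ pos ≤ ur := by push_cast at h2; omega
    simp only [flipSeg, if_pos hcond, List.map_cons]
    rw [ih (pos + 1) (by omega) (by push_cast at h2 ⊢; omega)]

theorem applyFlip_spec (t z : Int → Int) (idx l r : Int) (t1 z1 : Int → Int)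
    (h1 : 1 ≤ idx) (hlr : l ≤ r) (hz : LZ01 z) (hzi : z idx = 0)
    (ht1 : t1 = fset t idx ((r - l + 1) - t idx))
    (hz1 : z1 = if l = r then z else
      fset (fset z (idx * 2) (pyxor1 (z (idx * 2)))) (idx * 2 + 1)
        (pyxor1 (fset z (idx * 2) (pyxor1 (z (idx * 2))) (idx * 2 + 1)))) :
    (∀ j, j ≠ idx → j ≠ idx * 2 → j ≠ idx * 2 + 1 → t1 j = t j ∧ z1 j = z j) ∧
    LZ01 z1 ∧ z1 idx = 0 ∧
    den t1 z1 idx l r = (den t z idx l r).map (fun x => 1 - x) ∧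
    (SegInv t z idx l r → SegInv t1 z1 idx l r) ∧
    (SegInv t z idx l r → t1 idx = (den t1 z1 idx l r).sum) := by
  by_cases hleaf : l = r
  · subst hleaf
    rw [if_pos rfl] at hz1
    have ht1idx : t1 idx = (l - l + 1) - t idx := by rw [ht1, fset_self]
    have hden : den t1 z1 idx l l = (den t z idx l l).map (fun x => 1 - x) := by
      rw [hz1, den_leaf _ _ _ _ _ le_rfl, den_leaf _ _ _ _ _ le_rfl, hzi, ht1idx]
      simp [flipL]
    refine ⟨fun j hj0 _ _ => ⟨by rw [ht1, fset_other _ _ _ _ hj0], by rw [hz1]⟩,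
      by rw [hz1]; exact hz, by rw [hz1]; exact hzi, hden,
      fun _ => SegInv_leaf _ _ _ _ _ le_rfl, fun _ => ?_⟩
    rw [hden, den_leaf _ _ _ _ _ le_rfl, hzi, ht1idx]
    simp [flipL]
  · have hlr' : l < r := lt_of_le_of_ne hlr hleaf
    have hnotle : ¬ r ≤ l := by omega
    have hmid := pv_mid_bounds hlr'
    have hc0 : (1:Int) ≤ idx * 2 := by omega
    have hc1 : (1:Int) ≤ idx * 2 + 1 := by omega
    have hne01 : idx * 2 + 1 ≠ idx * 2 := by omega
    have hne10 : idx * 2 ≠ idx * 2 + 1 := by omega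
    have hneI0 : idx * 2 ≠ idx := by omega
    have hneI1 : idx * 2 + 1 ≠ idx := by omega
    have hI0 : idx ≠ idx * 2 := by omega
    have hI1 : idx ≠ idx * 2 + 1 := by omega
    rw [if_neg hleaf] at hz1
    set za := fset z (idx * 2) (pyxor1 (z (idx * 2))) with hza
    have hza1 : za (idx * 2 + 1) = z (idx * 2 + 1) := fset_other _ _ _ _ hne01
    have hz1idx : z1 idx = 0 := by
      rw [hz1, fset_other _ _ _ _ hI1, hza, fset_other _ _ _ _ hI0, hzi]
    have ht1idx : t1 idx = (r - l + 1) - t idx := by rw [ht1, fset_self]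
    have hout : ∀ j, j ≠ idx → j ≠ idx * 2 → j ≠ idx * 2 + 1 → t1 j = t j ∧ z1 j = z j := by
      intro j hj0 hj1 hj2
      exact ⟨by rw [ht1, fset_other _ _ _ _ hj0],
        by rw [hz1, fset_other _ _ _ _ hj2, hza, fset_other _ _ _ _ hj1]⟩
    have cL : ∀ j, pref (idx * 2) j → t1 j = t j ∧ z1 j = za j := by
      intro j hj
      have hj0 : j ≠ idx := by rintro rfl; exact pref_c0_not_self h1 hj
      have hj2 : j ≠ idx * 2 + 1 := by rintro rfl; exact pref_disj h1 hj (pref_self _)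
      exact ⟨by rw [ht1, fset_other _ _ _ _ hj0], by rw [hz1, fset_other _ _ _ _ hj2]⟩
    have cR : ∀ j, pref (idx * 2 + 1) j →
        t1 j = t j ∧ z1 j = fset z (idx * 2 + 1) (pyxor1 (z (idx * 2 + 1))) j := by
      intro j hj
      have hj0 : j ≠ idx := by rintro rfl; exact pref_c1_not_self h1 hj
      have hj1 : j ≠ idx * 2 := by rintro rfl; exact pref_disj h1 (pref_self _) hj
      refine ⟨by rw [ht1, fset_other _ _ _ _ hj0], ?_⟩
      by_cases hj2 : j = idx * 2 + 1
      · subst hj2; rw [hz1, fset_self, fset_self, hza1]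
      · rw [hz1, fset_other _ _ _ _ hj2, hza, fset_other _ _ _ _ hj1, fset_other _ _ _ _ hj2]
    have denL : den t1 z1 (idx * 2) l (PySem.Int.floordiv (l + r) 2) =
        (den t z (idx * 2) l (PySem.Int.floordiv (l + r) 2)).map (fun x => 1 - x) := by
      rw [den_congr t1 z1 t za _ (idx * 2) l _ rfl cL, hza]
      exact den_toggle t z (idx * 2) l _ hc0 (hz _)
    have denR : den t1 z1 (idx * 2 + 1) (PySem.Int.floordiv (l + r) 2 + 1) r =
        (den t z (idx * 2 + 1) (PySem.Int.floordiv (l + r) 2 + 1) r).map (fun x => 1 - x) := by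
      rw [den_congr t1 z1 t (fset z (idx * 2 + 1) (pyxor1 (z (idx * 2 + 1)))) _ (idx * 2 + 1) _ r rfl cR]
      exact den_toggle t z (idx * 2 + 1) _ r hc1 (hz _)
    have hden : den t1 z1 idx l r = (den t z idx l r).map (fun x => 1 - x) := by
      rw [den_node _ _ _ _ _ hnotle, den_node t z _ _ _ hnotle, hz1idx, hzi, denL, denR]
      simp [flipL, List.map_append]
    refine ⟨hout, fun j => ?_, hz1idx, hden, fun hInv => ?_, fun hInv => ?_⟩
    · by_cases hj0 : j = idx
      · subst hj0; rw [hz1idx]; left; rfl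
      · by_cases hj1 : j = idx * 2
        · subst hj1
          rw [hz1, fset_other _ _ _ _ hne10, hza, fset_self]
          exact pyxor1_mem (hz _)
        · by_cases hj2 : j = idx * 2 + 1
          · subst hj2
            rw [hz1, fset_self, hza1]
            exact pyxor1_mem (hz _)
          · rw [(hout j hj0 hj1 hj2).2]; exact hz j
    · obtain ⟨hsum, hIL, hIR⟩ := (SegInv_node t z idx l r hnotle).1 hInv
      refine (SegInv_node t1 z1 idx l r hnotle).2 ⟨?_, ?_, ?_⟩
      · rw [denL, denR, sum_map_flip, sum_map_flip, den_len, den_len, ht1idx]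
        have hlen : (((PySem.Int.floordiv (l + r) 2 - l).toNat : Int) + 1) +
            (((r - (PySem.Int.floordiv (l + r) 2 + 1)).toNat : Int) + 1) = r - l + 1 := by omega
        push_cast at hlen ⊢
        linarith [hsum, hlen]
      · refine (SegInv_congr t1 z1 t z _ (idx * 2) l _ rfl hc0
          (fun j hj => (cL j hj).1) (fun j hj hjr => ?_)).2 hIL
        rw [(cL j hj).2, hza, fset_other _ _ _ _ hjr]
      · refine (SegInv_congr t1 z1 t z _ (idx * 2 + 1) _ r rfl hc1
          (fun j hj => (cR j hj).1) (fun j hj hjr => ?_)).2 hIR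
        rw [(cR j hj).2, fset_other _ _ _ _ hjr]
    · obtain ⟨hsum, hIL, hIR⟩ := (SegInv_node t z idx l r hnotle).1 hInv
      rw [den_node t1 z1 idx l r hnotle, hz1idx]
      simp only [flipL, if_true, eq_self_iff_true]
      rw [denL, denR, List.sum_append, sum_map_flip, sum_map_flip,
        den_len, den_len, ht1idx]
      have hlen : (((PySem.Int.floordiv (l + r) 2 - l).toNat : Int) + 1) +
          (((r - (PySem.Int.floordiv (l + r) 2 + 1)).toNat : Int) + 1) = r - l + 1 := by omega
      push_cast at hlen ⊢
      linarith [hsum, hlen]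

theorem update_spec : ∀ (fuel : Nat) (t z : Int → Int) (idx l r ul ur : Int),
    1 ≤ idx → l ≤ r → (r - l).toNat < fuel → LZ01 z → SegInv t z idx l r →
    (∀ j, ¬ pref idx j → (updateA fuel t z idx l r ul ur).1 j = t j ∧
      (updateA fuel t z idx l r ul ur).2 j = z j) ∧
    LZ01 (updateA fuel t z idx l r ul ur).2 ∧
    SegInv (updateA fuel t z idx l r ul ur).1 (updateA fuel t z idx l r ul ur).2 idx l r ∧
    den (updateA fuel t z idx l r ul ur).1 (updateA fuel t z idx l r ul ur).2 idx l r
      = flipSeg ul ur l (den t z idx l r) ∧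
    (updateA fuel t z idx l r ul ur).2 idx = 0 ∧
    (updateA fuel t z idx l r ul ur).1 idx
      = (den (updateA fuel t z idx l r ul ur).1 (updateA fuel t z idx l r ul ur).2 idx l r).sum := by
  intro fuel
  induction fuel with
  | zero => intro t z idx l r ul ur _ _ hf; omega
  | succ fuel ih =>
    intro t z idx l r ul ur h1 hlr hf hz hInv
    obtain ⟨Pf, Pz, Pzi, Pden, PInv, Psum⟩ := push_spec t z idx l r h1 hlr hz
    set tp := (pushA t z idx l r).1 with htp
    set zp := (pushA t z idx l r).2 with hzp
    have hIp : SegInv tp zp idx l r := PInv hInv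
    have hsp : tp idx = (den t z idx l r).sum := Psum hInv
    by_cases hd : l > ur ∨ r < ul
    · have hU : updateA (fuel + 1) t z idx l r ul ur = (tp, zp) := by
        rw [htp, hzp]
        simp only [updateA]
        rw [if_pos hd]
      rw [hU]
      refine ⟨Pf, Pz, hIp, ?_, Pzi, ?_⟩
      · rw [Pden, flipSeg_out]
        rw [den_len]
        push_cast
        omega
      · rw [Pden]; exact hsp
    · by_cases hc : ul ≤ l ∧ r ≤ ur
      · have hU : updateA (fuel + 1) t z idx l r ul ur =
            (fset tp idx ((r - l + 1) - tp idx),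
             if l = r then zp else
               fset (fset zp (idx * 2) (pyxor1 (zp (idx * 2)))) (idx * 2 + 1)
                 (pyxor1 (fset zp (idx * 2) (pyxor1 (zp (idx * 2))) (idx * 2 + 1)))) := by
          rw [htp, hzp]
          simp only [updateA]
          rw [if_neg hd, if_pos hc]
          by_cases hlf : l = r <;> simp [hlf]
        rw [hU]
        obtain ⟨Af, Az, Azi, Aden, AInv, Asum⟩ := applyFlip_spec tp zp idx l r _ _ h1 hlr Pz Pzi rfl rfl
        have hdenfull : den (fset tp idx ((r - l + 1) - tp idx))
            (if l = r then zp else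
              fset (fset zp (idx * 2) (pyxor1 (zp (idx * 2)))) (idx * 2 + 1)
                (pyxor1 (fset zp (idx * 2) (pyxor1 (zp (idx * 2))) (idx * 2 + 1)))) idx l r
            = flipSeg ul ur l (den t z idx l r) := by
          rw [Aden, Pden, flipSeg_in ul ur _ l hc.1]
          rw [den_len]
          push_cast
          omega
        refine ⟨fun j hj => ?_, Az, AInv hIp, hdenfull, Azi, ?_⟩
        · have hj0 : j ≠ idx := by rintro rfl; exact hj (pref_self _)
          have hj1 : j ≠ idx * 2 := by rintro rfl; exact hj (pref_of_c0 _)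
          have hj2 : j ≠ idx * 2 + 1 := by rintro rfl; exact hj (pref_of_c1 _)
          obtain ⟨e1, e2⟩ := Af j hj0 hj1 hj2
          exact ⟨e1.trans (Pf j hj).1, e2.trans (Pf j hj).2⟩
        · exact Asum hIp
      · have hlr' : l < r := by omega
        have hnotle : ¬ r ≤ l := by omega
        have hmid := pv_mid_bounds hlr'
        have hc0 : (1:Int) ≤ idx * 2 := by omega
        have hc1 : (1:Int) ≤ idx * 2 + 1 := by omega
        obtain ⟨hs0, hiL, hiR⟩ := (SegInv_node tp zp idx l r hnotle).1 hIp
        obtain ⟨Lf, Lz, LInv, Lden, Lzi, Lsum⟩ := ih tp zp (idx * 2) l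
          (PySem.Int.floordiv (l + r) 2) ul ur hc0 (by omega) (by omega) Pz hiL
        set p1 := updateA fuel tp zp (idx * 2) l (PySem.Int.floordiv (l + r) 2) ul ur with hp1
        have hRtrans : ∀ j, pref (idx * 2 + 1) j → p1.1 j = tp j ∧ p1.2 j = zp j :=
          fun j hj => Lf j (fun hcj => pref_disj h1 hcj hj)
        have hdenRp : den p1.1 p1.2 (idx * 2 + 1) (PySem.Int.floordiv (l + r) 2 + 1) r
            = den tp zp (idx * 2 + 1) (PySem.Int.floordiv (l + r) 2 + 1) r :=
          den_congr _ _ _ _ _ (idx * 2 + 1) _ r rfl hRtrans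
        have hiR' : SegInv p1.1 p1.2 (idx * 2 + 1) (PySem.Int.floordiv (l + r) 2 + 1) r :=
          (SegInv_congr p1.1 p1.2 tp zp _ (idx * 2 + 1) _ r rfl hc1
            (fun j hj => (hRtrans j hj).1) (fun j hj _ => (hRtrans j hj).2)).2 hiR
        obtain ⟨Rf, Rz, RInv, Rden, Rzi, Rsum⟩ := ih p1.1 p1.2 (idx * 2 + 1)
          (PySem.Int.floordiv (l + r) 2 + 1) r ul ur hc1 (by omega) (by omega) Lz hiR'
        set p2 := updateA fuel p1.1 p1.2 (idx * 2 + 1) (PySem.Int.floordiv (l + r) 2 + 1) r ul ur with hp2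
        have hU : updateA (fuel + 1) t z idx l r ul ur =
            (fset p2.1 idx (p2.1 (idx * 2) + p2.1 (idx * 2 + 1)), p2.2) := by
          rw [hp2, hp1, htp, hzp]
          simp only [updateA]
          rw [if_neg hd, if_neg hc]
        rw [hU]
        dsimp only
        set tf := fset p2.1 idx (p2.1 (idx * 2) + p2.1 (idx * 2 + 1)) with htf
        have f2L : ∀ j, pref (idx * 2) j → p2.1 j = p1.1 j ∧ p2.2 j = p1.2 j :=
          fun j hj => Rf j (fun hcj => pref_disj h1 hj hcj)
        have hfL : ∀ j, pref (idx * 2) j → tf j = p1.1 j ∧ p2.2 j = p1.2 j := by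
          intro j hj
          have hj0 : j ≠ idx := by rintro rfl; exact pref_c0_not_self h1 hj
          exact ⟨by rw [htf, fset_other _ _ _ _ hj0, (f2L j hj).1], (f2L j hj).2⟩
        have hfR : ∀ j, pref (idx * 2 + 1) j → tf j = p2.1 j := by
          intro j hj
          have hj0 : j ≠ idx := by rintro rfl; exact pref_c1_not_self h1 hj
          rw [htf, fset_other _ _ _ _ hj0]
        have hzfidx : p2.2 idx = 0 := by
          rw [(Rf idx (pref_c1_not_self h1)).2, (Lf idx (pref_c0_not_self h1)).2, Pzi]
        have etf : tf idx = p2.1 (idx * 2) + p2.1 (idx * 2 + 1) := by rw [htf, fset_self]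
        have e1 : den tf p2.2 (idx * 2) l (PySem.Int.floordiv (l + r) 2)
            = den p1.1 p1.2 (idx * 2) l (PySem.Int.floordiv (l + r) 2) :=
          den_congr tf p2.2 p1.1 p1.2 _ (idx * 2) l _ rfl hfL
        have e2 : den tf p2.2 (idx * 2 + 1) (PySem.Int.floordiv (l + r) 2 + 1) r
            = den p2.1 p2.2 (idx * 2 + 1) (PySem.Int.floordiv (l + r) 2 + 1) r :=
          den_congr tf p2.2 p2.1 p2.2 _ (idx * 2 + 1) _ r rfl (fun j hj => ⟨hfR j hj, rfl⟩)
        have denLf : den tf p2.2 (idx * 2) l (PySem.Int.floordiv (l + r) 2)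
            = flipSeg ul ur l (den tp zp (idx * 2) l (PySem.Int.floordiv (l + r) 2)) := by
          rw [den_congr tf p2.2 p1.1 p1.2 _ (idx * 2) l _ rfl hfL]
          exact Lden
        have denRf : den tf p2.2 (idx * 2 + 1) (PySem.Int.floordiv (l + r) 2 + 1) r
            = flipSeg ul ur (PySem.Int.floordiv (l + r) 2 + 1)
                (den tp zp (idx * 2 + 1) (PySem.Int.floordiv (l + r) 2 + 1) r) := by
          rw [den_congr tf p2.2 p2.1 p2.2 _ (idx * 2 + 1) _ r rfl (fun j hj => ⟨hfR j hj, rfl⟩),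
            Rden, hdenRp]
        have hdenfin : den tf p2.2 idx l r = flipSeg ul ur l (den t z idx l r) := by
          rw [den_node _ _ _ _ _ hnotle, hzfidx]
          simp only [flipL, if_true, eq_self_iff_true]
          rw [denLf, denRf, ← Pden, den_node tp zp _ _ _ hnotle, Pzi]
          simp only [flipL, if_true, eq_self_iff_true]
          rw [flipSeg_append]
          congr 2
          rw [den_len]
          push_cast
          omega
        refine ⟨fun j hj => ?_, Rz, ?_, hdenfin, hzfidx, ?_⟩
        · have hj0 : j ≠ idx := by rintro rfl; exact hj (pref_self _)
          have hjL : ¬ pref (idx * 2) j := fun hcj => hj (pref_child0 hcj)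
          have hjR : ¬ pref (idx * 2 + 1) j := fun hcj => hj (pref_child1 hcj)
          obtain ⟨r1, r2⟩ := Rf j hjR
          obtain ⟨l1, l2⟩ := Lf j hjL
          obtain ⟨q1, q2⟩ := Pf j hj
          exact ⟨by rw [htf, fset_other _ _ _ _ hj0, r1, l1, q1], by rw [r2, l2, q2]⟩
        · refine (SegInv_node tf p2.2 idx l r hnotle).2 ⟨?_, ?_, ?_⟩
          · rw [etf, e1, e2, ← Lsum, ← Rsum, (f2L (idx * 2) (pref_self _)).1]
          · exact (SegInv_congr tf p2.2 p1.1 p1.2 _ (idx * 2) l _ rfl hc0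
              (fun j hj => (hfL j hj).1) (fun j hj _ => (hfL j hj).2)).2 LInv
          · exact (SegInv_congr tf p2.2 p2.1 p2.2 _ (idx * 2 + 1) _ r rfl hc1
              (fun j hj => hfR j hj) (fun _ _ _ => rfl)).2 RInv
        · rw [den_node _ _ _ _ _ hnotle, hzfidx]
          simp only [flipL, if_true, eq_self_iff_true]
          rw [List.sum_append, e1, e2, ← Lsum, ← Rsum, etf, (f2L (idx * 2) (pref_self _)).1]

theorem query_root (fuel : Nat) (t z : Int → Int) (idx l r : Int) (hlr : l ≤ r) :
    queryA (fuel + 1) t z idx l r l r =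
      ((pushA t z idx l r).1, (pushA t z idx l r).2, (pushA t z idx l r).1 idx) := by
  simp only [queryA]
  rw [if_neg (by omega), if_pos ⟨le_rfl, le_rfl⟩]

theorem seg_all (arr : List Int) (h : arr ≠ []) : seg arr 0 ((arr.length : Int) - 1) = arr := by
  have hn : 1 ≤ arr.length := List.length_pos_of_ne_nil h
  have hcnt : ((arr.length : Int) - 1 - 0).toNat + 1 = arr.length := by omega
  apply List.ext_getElem
  · simp [seg]; omega
  · intro i h1 h2
    simp only [seg, hcnt, List.getElem_map, List.getElem_range]
    have h0 : (0:Int) + (i:Int) = ((i:Nat) : Int) := by ring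
    rw [pget, h0, PySem.List.pyGetD_natCast, List.getD_eq_getElem _ _ h2]

theorem pv_sum_set : ∀ (xs : List Int) (i : Nat) (v : Int) (h : i < xs.length),
    (xs.set i v).sum = xs.sum + v - xs[i] := by
  intro xs
  induction xs with
  | nil => intro i v h; simp at h
  | cons x xs ih =>
    intro i v h
    cases i with
    | zero => simp; ring
    | succ i =>
      simp only [List.set_cons_succ, List.sum_cons, List.getElem_cons_succ]
      rw [ih i v (by simpa using h)]
      ring

theorem flipSeg_getElem (ul ur : Int) : ∀ (xs : List Int) (pos : Int) (i : Nat) (h : i < xs.length),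
    (flipSeg ul ur pos xs)[i]'(by rw [flipSeg_length]; exact h) =
      if ul ≤ pos + i ∧ pos + i ≤ ur then 1 - xs[i] else xs[i] := by
  intro xs
  induction xs with
  | nil => intro pos i h; simp at h
  | cons x xs ih =>
    intro pos i h
    cases i with
    | zero => simp [flipSeg]
    | succ i =>
      simp only [flipSeg, List.getElem_cons_succ]
      rw [ih (pos + 1) i (by simpa using h)]
      have e : pos + 1 + (i : Int) = pos + ((i + 1 : Nat) : Int) := by push_cast; ring
      rw [e]

theorem flipSeg_empty (ul ur : Int) (h : ur < ul) : ∀ (xs : List Int) (pos : Int),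
    flipSeg ul ur pos xs = xs := by
  intro xs
  induction xs with
  | nil => intro pos; rfl
  | cons x xs ih =>
    intro pos
    simp only [flipSeg, if_neg (by omega : ¬ (ul ≤ pos ∧ pos ≤ ur)), ih]

theorem flip_set_peel (bits : List Int) (lo hi : Int) (h0 : 0 ≤ lo) (h1 : lo ≤ hi)
    (h2 : hi < (bits.length : Int)) :
    flipSeg (lo + 1) hi 0 (bits.set lo.toNat (1 - pget bits lo)) = flipSeg lo hi 0 bits := by
  apply List.ext_getElem
  · rw [flipSeg_length, flipSeg_length, List.length_set]
  · intro i hA hB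
    have hiB : i < bits.length := by rw [flipSeg_length] at hB; exact hB
    have hiS : i < (bits.set lo.toNat (1 - pget bits lo)).length := by simpa using hiB
    rw [flipSeg_getElem (lo + 1) hi _ 0 i hiS, flipSeg_getElem lo hi bits 0 i hiB]
    by_cases hil : (i : Int) = lo
    · have hto : lo.toNat = i := by omega
      rw [if_neg (by omega), if_pos (by constructor <;> omega), List.getElem_set, if_pos hto,
        pget, PySem.List.pyGetD_eq_getElem bits 0 h0 (by omega)]
      simp only [hto]
    · have hto : lo.toNat ≠ i := by omega
      have hCC : (lo + 1 ≤ 0 + (i : Int) ∧ 0 + (i : Int) ≤ hi) ↔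
          (lo ≤ 0 + (i : Int) ∧ 0 + (i : Int) ≤ hi) := by omega
      rw [List.getElem_set, if_neg hto]
      simp only [hCC]

theorem flipSeg_clamp (bits : List Int) (ul ur : Int) :
    flipSeg (max ul 0) (min ur ((bits.length : Int) - 1)) 0 bits = flipSeg ul ur 0 bits := by
  apply List.ext_getElem
  · rw [flipSeg_length, flipSeg_length]
  · intro i h1 h2
    have hi : i < bits.length := by rw [flipSeg_length] at h1; exact h1
    rw [flipSeg_getElem _ _ _ 0 i hi, flipSeg_getElem _ _ _ 0 i hi]
    have hCC : (max ul 0 ≤ 0 + (i : Int) ∧ 0 + (i : Int) ≤ min ur ((bits.length : Int) - 1)) ↔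
        (ul ≤ 0 + (i : Int) ∧ 0 + (i : Int) ≤ ur) := by omega
    simp only [hCC]

theorem flipGo_spec : ∀ (cnt : Nat) (lo hi : Int) (bits : List Int) (ones : Int),
    0 ≤ lo → hi < (bits.length : Int) → (hi + 1 - lo).toNat = cnt →
    flipGoB (PySem.List.pyRange lo (hi + 1) 1) bits ones =
      (flipSeg lo hi 0 bits, ones + (flipSeg lo hi 0 bits).sum - bits.sum) := by
  intro cnt
  induction cnt with
  | zero =>
    intro lo hi bits ones h0 hl hc
    rw [PySem.List.pyRange_one_eq_nil (by omega), flipSeg_empty _ _ (by omega)]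
    simp only [flipGoB, Prod.mk.injEq]
    exact ⟨trivial, by ring⟩
  | succ cnt ih =>
    intro lo hi bits ones h0 hl hc
    have hlohi : lo ≤ hi := by omega
    rw [PySem.List.pyRange_one_cons (by omega)]
    simp only [flipGoB]
    have hpg : pget bits lo = bits[lo.toNat]'(by omega) := by
      rw [pget, PySem.List.pyGetD_eq_getElem bits 0 h0 (by omega)]
    rw [ih (lo + 1) hi _ _ (by omega) (by simpa using hl) (by omega),
      flip_set_peel bits lo hi h0 hlohi hl]
    simp only [Prod.mk.injEq]
    refine ⟨trivial, ?_⟩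
    rw [pv_sum_set _ _ _ (by omega), hpg]
    ring

theorem loop_spec (N : Nat) (hN : 1 ≤ N) :
    ∀ (qs : List (List Int)) (t z : Int → Int) (bits : List Int) (total : Int) (res : List Int),
    LZ01 z → SegInv t z 1 0 ((N : Int) - 1) → den t z 1 0 ((N : Int) - 1) = bits →
    (qs.foldl (stepA (N : Int) N) (t, z, total, res)).2.2.2 =
    (qs.foldl (stepB (N : Int)) (bits, bits.sum, total, res)).2.2.2 := by
  intro qs
  induction qs with
  | nil => intros; rfl
  | cons q qs ih =>
    intro t z bits total res hz hInv hden
    have hblen : bits.length = N := by rw [← hden, den_len]; omega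
    simp only [List.foldl_cons]
    by_cases h1q : pget q 0 = 1
    · obtain ⟨Uf, Uz, UInv, Uden, Uzi, Usum⟩ := update_spec N t z 1 0 ((N : Int) - 1)
        (pget q 1) (pget q 2) le_rfl (by omega) (by omega) hz hInv
      have hden' : den (updateA N t z 1 0 ((N : Int) - 1) (pget q 1) (pget q 2)).1
          (updateA N t z 1 0 ((N : Int) - 1) (pget q 1) (pget q 2)).2 1 0 ((N : Int) - 1)
          = flipSeg (pget q 1) (pget q 2) 0 bits := by
        rw [Uden, hden]
      have hgo := flipGo_spec ((min (pget q 2) ((N : Int) - 1)) + 1 - max (pget q 1) 0).toNat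
        (max (pget q 1) 0) (min (pget q 2) ((N : Int) - 1)) bits bits.sum
        (by omega) (by rw [hblen]; omega) rfl
      have hclamp : flipSeg (max (pget q 1) 0) (min (pget q 2) ((N : Int) - 1)) 0 bits
          = flipSeg (pget q 1) (pget q 2) 0 bits := by
        rw [show ((N : Int) - 1) = ((bits.length : Int) - 1) by rw [hblen]]
        exact flipSeg_clamp bits (pget q 1) (pget q 2)
      have hB : stepB (N : Int) (bits, bits.sum, total, res) q =
          (flipSeg (pget q 1) (pget q 2) 0 bits, (flipSeg (pget q 1) (pget q 2) 0 bits).sum,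
            total, res) := by
        simp only [stepB, if_pos h1q]
        rw [hgo, hclamp, show bits.sum + (flipSeg (pget q 1) (pget q 2) 0 bits).sum - bits.sum
          = (flipSeg (pget q 1) (pget q 2) 0 bits).sum from by ring]
      rw [hB]
      simp only [stepA, if_pos h1q]
      exact ih _ _ _ total res Uz UInv hden'
    · by_cases h2q : pget q 0 = 2
      · have hq : queryA N t z 1 0 ((N : Int) - 1) 0 ((N : Int) - 1) =
            ((pushA t z 1 0 ((N : Int) - 1)).1, (pushA t z 1 0 ((N : Int) - 1)).2,
              (pushA t z 1 0 ((N : Int) - 1)).1 1) := by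
          obtain ⟨f, hf⟩ : ∃ f, N = f + 1 := ⟨N - 1, by omega⟩
          rw [hf]
          exact query_root f t z 1 0 ((((f + 1 : Nat)) : Int) - 1) (by push_cast; omega)
        obtain ⟨Pf, Pz, Pzi, Pden, PInv, Psum⟩ := push_spec t z 1 0 ((N : Int) - 1) le_rfl
          (by omega) hz
        have hval : (pushA t z 1 0 ((N : Int) - 1)).1 1 = bits.sum := by
          rw [Psum hInv, hden]
        simp only [stepA, stepB, if_pos h2q, if_neg h1q]
        rw [hq]
        simp only
        rw [hval]
        exact ih _ _ _ _ res Pz (PInv hInv) (Pden.trans hden)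
      · simp only [stepA, stepB, if_neg h1q, if_neg h2q]
        exact ih _ _ _ total _ hz hInv hden

theorem main_eq (nums1 nums2 : List Int) (queries : List (List Int)) (hn : nums1 ≠ []) :
    (queries.foldl (stepA ((nums1.length : Int)) nums1.length)
      (buildA nums1.length nums1 (fun _ => 0) 1 0 ((nums1.length : Int) - 1),
        fun _ => 0, nums2.sum, ([] : List Int))).2.2.2 =
    (queries.foldl (stepB ((nums1.length : Int)))
      (nums1, nums1.sum, nums2.sum, ([] : List Int))).2.2.2 := by
  have hN : 1 ≤ nums1.length := List.length_pos_of_ne_nil hn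
  obtain ⟨Bf, Bden, BInv, Bsum⟩ := build_spec nums1.length nums1 (fun _ => 0) 1 0
    ((nums1.length : Int) - 1) le_rfl (by omega) (by omega)
  exact loop_spec nums1.length hN queries _ z0 nums1 nums2.sum []
    (fun j => Or.inl rfl) BInv (by rw [Bden]; exact seg_all nums1 hn)

-- ===== VERDICT (by name: the statement is the Claim_ definition above) =====
theorem handleQuery_spec : Claim_equal_handleQuery := by
  intro nums1 nums2 queries _ hpre
  unfold Spec_handleQuery handleQuery handleQuery_alt
  exact main_eq nums1 nums2 queries hpre.1
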